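-- pv_equiv track=rewrite | github.com/statisdisc/animation | pixel_filter/src/utilities/natural_keys.py | sort_natural
-- ===== SOURCE A (Python) =====
-- def atoi(text):
--     return int(text) if text.isdigit() else text
--
-- def id_from_filename(filename, filename_list):
--
--     success = False
--     for index_start in range(len(filename)):
--         for file in filename_list:
--             if file[index_start] != filename[index_start]:
--                 success = True
--                 break
--         if success:
--             break
--
--     success = False
--     for index_end in range(len(filename)):
--         for file in filename_list:
--             if file[-index_end-1] != filename[-index_end-1]:
--                 success = True
--                 break
--         if success:
--             break
--
--     if index_end == 0:
--         return filename[index_start:]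
--     else:
--         return filename[index_start:-index_end]
--
-- def sort_natural(text_list):
--     sort_dict = {}
--     for text in text_list:
--         sort_dict[atoi(id_from_filename(text, text_list))] = text
--
--     text_list_new = []
--     for key in sorted(sort_dict):
--         text_list_new.append(sort_dict[key])
--
--     return text_list_new
-- ===== SOURCE B (Python) =====
-- def _lcp_len(a, b):
--     i = 0
--     while i < len(a) and i < len(b) and a[i] == b[i]:
--         i += 1
--     return i
--
-- def sort_natural(text_list):
--     if not text_list:
--         return []
--     first = text_list[0]
--     rf = first[::-1]
--     q = len(first)
--     r = len(first)
--     for t in text_list: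
--         q = min(q, _lcp_len(first, t))
--         r = min(r, _lcp_len(rf, t[::-1]))
--     d = {}
--     for t in text_list:
--         seg = t[q:len(t) - r]
--         d[int(seg) if seg.isdigit() else seg] = t
--     return [d[k] for k in sorted(d)]
-- ===== Notes on version B (the rewrite author's own statement) =====
-- stated objective: faster
-- what changed: B computes the list's common-prefix and common-suffix lengths once (LCP of each string against the first element, one pass) and slices every filename with that single cut, replacing A's per-filename position-by-position rescans of the entire list from both ends.
-- outside the precondition, e.g. on sort_natural(['aa', 'ab', 'a']): A returns ['a', 'ab'], B returns ['a', 'aa', 'ab']; on sort_natural(['aa', 'ba', 'a']): A returns ['a', 'ba'], B returns ['a', 'aa', 'ba']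
import Mathlib
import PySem

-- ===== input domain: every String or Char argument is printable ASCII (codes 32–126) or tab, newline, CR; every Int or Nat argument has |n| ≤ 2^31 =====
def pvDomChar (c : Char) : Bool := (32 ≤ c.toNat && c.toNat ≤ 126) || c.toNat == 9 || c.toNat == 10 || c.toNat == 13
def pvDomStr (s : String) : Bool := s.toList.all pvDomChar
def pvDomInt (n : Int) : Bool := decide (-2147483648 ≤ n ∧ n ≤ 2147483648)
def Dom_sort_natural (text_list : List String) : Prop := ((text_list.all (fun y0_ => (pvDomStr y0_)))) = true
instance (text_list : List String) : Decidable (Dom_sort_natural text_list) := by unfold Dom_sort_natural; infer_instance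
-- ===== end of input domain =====

-- B computes the common prefix/suffix cut of the whole list once (LCP against the first element)
-- and slices every filename with it, replacing A's per-filename rescans of the whole list (faster).

-- ===== PORT A =====
-- Python's atoi returns `int(text)` for digit strings and the string otherwise; the int-or-str
-- key is encoded as (int value, "") for digit strings and (0, text) otherwise — exact under
-- Pre_, which demands the keys of one call homogeneous (mixed keys make Python's sorted raise).
def pvAtoi (text : String) : Int × String :=
  if PySem.Str.strIsdigit text then ((PySem.Int.ofStr? text).getD 0, "") else (0, text)

def pvIdFromFilename (filename : String) (filename_list : List String) : String :=
  let n := filename.toList.length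
  let index_start := ((List.range n).find? (fun (i : Nat) =>
      filename_list.any (fun file =>
        decide (PySem.Str.pyGet? file ((i : Int)) ≠ PySem.Str.pyGet? filename ((i : Int)))))).getD (n - 1)
  let index_end := ((List.range n).find? (fun (j : Nat) =>
      filename_list.any (fun file =>
        decide (PySem.Str.pyGet? file (-((j : Int)) - 1) ≠ PySem.Str.pyGet? filename (-((j : Int)) - 1))))).getD (n - 1)
  if index_end = 0 then PySem.Str.slice filename (some (index_start : Int)) none
  else PySem.Str.slice filename (some (index_start : Int)) (some (-(index_end : Int)))

def sort_natural (text_list : List String) : List String :=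
  let sort_dict := text_list.foldl
    (fun d text => d.insert (pvAtoi (pvIdFromFilename text text_list)) text)
    (PySem.Dict.empty : PySem.Dict (Int × String) String)
  (PySem.List.sorted2 sort_dict.keys Prod.fst Prod.snd).map (fun key => sort_dict.getD key "")

-- ===== PORT B =====
def pvLcpLen : List Char → List Char → Nat
  | a :: as, b :: bs => if a = b then pvLcpLen as bs + 1 else 0
  | _, _ => 0

def sort_natural_alt (text_list : List String) : List String :=
  match text_list with
  | [] => []
  | first :: rest =>
    let l := first :: rest
    let rf := (PySem.Str.slice? first none none (-1)).getD ""
    let qr := l.foldl (fun qr t =>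
        (min qr.1 (pvLcpLen first.toList t.toList),
         min qr.2 (pvLcpLen rf.toList ((PySem.Str.slice? t none none (-1)).getD "").toList)))
      (first.toList.length, first.toList.length)
    let d := l.foldl (fun d t =>
        d.insert (pvAtoi (PySem.Str.slice t (some (qr.1 : Int)) (some ((t.toList.length : Int) - (qr.2 : Int))))) t)
      (PySem.Dict.empty : PySem.Dict (Int × String) String)
    (PySem.List.sorted2 d.keys Prod.fst Prod.snd).map (fun key => d.getD key "")

-- ===== PRECONDITION & SPEC =====
-- Helpers for Pre_ only: the common-prefix / common-suffix cut of the list and the resulting id slice.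
def pvQ (l : List String) : Nat :=
  match l with
  | [] => 0
  | first :: rest => Nat.findGreatest
      (fun n => ∀ t ∈ (first :: rest), first.toList.take n <+: t.toList) first.toList.length

def pvR (l : List String) : Nat :=
  match l with
  | [] => 0
  | first :: rest => Nat.findGreatest
      (fun n => ∀ t ∈ (first :: rest), first.toList.reverse.take n <+: t.toList.reverse) first.toList.reverse.length

def pvSeg (l : List String) (t : String) : String :=
  PySem.Str.slice t (some (pvQ l : Int)) (some ((t.toList.length : Int) - (pvR l : Int)))

-- Pre_ excludes exactly A's raises (an empty string member: NameError; ids mixing digit strings with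
-- non-digit strings: sorted raises TypeError) and, besides those, lists of ≥ 2 distinct strings in
-- which some string is a prefix (resp. suffix) of every string of the list: on those A's outcome
-- depends on the ordering of the list — most orderings raise IndexError — so no single value is
-- specified there and A's and B's answers are equally defensible.
def Pre_sort_natural (text_list : List String) : Prop :=
  (∀ f ∈ text_list, f.toList ≠ []) ∧
  ((∀ f ∈ text_list, ∀ g ∈ text_list, f = g) ∨
    ((¬ ∃ f ∈ text_list, ∀ g ∈ text_list, f.toList <+: g.toList) ∧
     (¬ ∃ f ∈ text_list, ∀ g ∈ text_list, f.toList <:+ g.toList) ∧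
     ((∀ f ∈ text_list, PySem.Str.strIsdigit (pvSeg text_list f) = true) ∨
      (∀ f ∈ text_list, PySem.Str.strIsdigit (pvSeg text_list f) = false))))

instance (text_list : List String) : Decidable (Pre_sort_natural text_list) := by
  unfold Pre_sort_natural; infer_instance

def pvWitness_sort_natural : List String := ["frame_10.png", "frame_9.png"]

def Spec_sort_natural (text_list : List String) (out : List String) : Prop := out = sort_natural_alt text_list
instance (text_list : List String) (out : List String) : Decidable (Spec_sort_natural text_list out) := by
  unfold Spec_sort_natural; infer_instance

-- ===== CLAIM =====
def Claim_equal_sort_natural : Prop := ∀ (text_list : List String), Dom_sort_natural text_list →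
  Pre_sort_natural text_list → Spec_sort_natural text_list (sort_natural text_list)

-- ===== LEMMAS AND PROOFS =====

lemma lcp_self : ∀ a : List Char, pvLcpLen a a = a.length := by
  intro a; induction a with
  | nil => rfl
  | cons x xs ih => simp [pvLcpLen, ih]

lemma lcp_get : ∀ a b : List Char, ∀ i : Nat, i < pvLcpLen a b → a[i]? = b[i]? := by
  intro a
  induction a with
  | nil => intro b i h; cases b <;> simp [pvLcpLen] at h
  | cons x xs ih =>
    intro b i h
    cases b with
    | nil => simp [pvLcpLen] at h
    | cons y ys =>
      simp only [pvLcpLen] at h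
      by_cases hxy : x = y
      · subst hxy
        cases i with
        | zero => simp
        | succ i => simp only [List.getElem?_cons_succ]; exact ih ys i (by simpa using h)
      · simp [hxy] at h

lemma lcp_ne : ∀ a b : List Char, pvLcpLen a b < a.length → pvLcpLen a b < b.length →
    a[pvLcpLen a b]? ≠ b[pvLcpLen a b]? := by
  intro a
  induction a with
  | nil => intro b h1 h2; simp at h1
  | cons x xs ih =>
    intro b h1 h2
    cases b with
    | nil => simp at h2
    | cons y ys =>
      by_cases hxy : x = y
      · simp only [pvLcpLen, if_pos hxy, List.length_cons] at h1 h2 ⊢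
        simpa [hxy] using ih ys (by omega) (by omega)
      · simp [pvLcpLen, hxy]

lemma prefix_of_agree (a b : List Char) (h : ∀ i < b.length, a[i]? = b[i]?) : b <+: a := by
  rw [List.prefix_iff_eq_take]
  apply List.ext_getElem?
  intro i
  rw [List.getElem?_take]
  split
  · exact (h i (by omega)).symm
  · exact List.getElem?_eq_none (by omega)

lemma foldl_min_le_init {α : Type} (g : α → Nat) :
    ∀ (l : List α) (init : Nat), l.foldl (fun m t => min m (g t)) init ≤ init := by
  intro l
  induction l with
  | nil => simp
  | cons x xs ih => intro init; exact le_trans (ih _) (by simp)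

lemma foldl_min_le_mem {α : Type} (g : α → Nat) :
    ∀ (l : List α) (init : Nat) (t : α), t ∈ l →
      l.foldl (fun m t => min m (g t)) init ≤ g t := by
  intro l
  induction l with
  | nil => simp
  | cons x xs ih =>
    intro init t ht
    rcases List.mem_cons.mp ht with h | h
    · subst h; exact le_trans (foldl_min_le_init g xs _) (by simp)
    · exact ih _ t h

lemma foldl_min_attain {α : Type} (g : α → Nat) :
    ∀ (l : List α) (init : Nat),
      l.foldl (fun m t => min m (g t)) init = init ∨
      ∃ t ∈ l, l.foldl (fun m t => min m (g t)) init = g t := by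
  intro l
  induction l with
  | nil => intro init; left; rfl
  | cons x xs ih =>
    intro init
    rcases ih (min init (g x)) with h | h
    · simp only [List.foldl_cons] at *
      by_cases hle : init ≤ g x
      · left; rw [h, Nat.min_eq_left hle]
      · right; exact ⟨x, by simp, by rw [h, Nat.min_eq_right (by omega)]⟩
    · right
      obtain ⟨t, ht, he⟩ := h
      exact ⟨t, by simp [ht], he⟩

lemma le_foldl_min {α : Type} (g : α → Nat) :
    ∀ (l : List α) (init m : Nat), m ≤ init → (∀ t ∈ l, m ≤ g t) →
      m ≤ l.foldl (fun a t => min a (g t)) init := by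
  intro l
  induction l with
  | nil => intro init m h0 _; simpa using h0
  | cons x xs ih =>
    intro init m h0 h
    exact ih _ m (le_min h0 (h x (by simp))) (fun t ht => h t (by simp [ht]))

lemma agree_le_lcp : ∀ (a b : List Char) (n : Nat), n ≤ a.length →
    (∀ i < n, a[i]? = b[i]?) → n ≤ pvLcpLen a b := by
  intro a
  induction a with
  | nil =>
    intro b n hn _
    have h0 : n = 0 := by simpa using hn
    simp [h0]
  | cons x xs ih =>
    intro b n hn hag
    cases n with
    | zero => omega
    | succ m =>
      have h0 : b[0]? = some x := by simpa using (hag 0 (by omega)).symm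
      cases b with
      | nil => simp at h0
      | cons y ys =>
        have hxy : x = y := by simpa using h0.symm
        simp only [pvLcpLen, if_pos hxy]
        have := ih ys m (by simpa using hn) (fun i hi => by
          simpa using hag (i + 1) (by omega))
        omega

lemma prefix_agree {p t : List Char} (h : p <+: t) : ∀ i < p.length, t[i]? = p[i]? := by
  intro i hi
  rw [List.prefix_iff_eq_take] at h
  conv_rhs => rw [h]
  rw [List.getElem?_take, if_pos hi]

lemma take_prefix_of_le_lcp (a b : List Char) (n : Nat) (hlcp : n ≤ pvLcpLen a b)
    (hn : n ≤ a.length) : a.take n <+: b := by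
  apply prefix_of_agree
  intro i hi
  rw [List.length_take] at hi
  have hin : i < n := by omega
  rw [List.getElem?_take, if_pos hin]
  exact (lcp_get a b i (by omega)).symm

lemma fg_eq (v : String → List Char) (first : String) (l : List String) :
    Nat.findGreatest (fun n => ∀ t ∈ l, (v first).take n <+: v t) (v first).length
      = l.foldl (fun m t => min m (pvLcpLen (v first) (v t))) (v first).length := by
  apply le_antisymm
  · apply le_foldl_min
    · exact Nat.findGreatest_le _
    · intro t ht
      have hP : ∀ t ∈ l, (v first).take
          (Nat.findGreatest (fun n => ∀ t ∈ l, (v first).take n <+: v t) (v first).length) <+: v t :=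
        Nat.findGreatest_spec (P := fun n => ∀ t ∈ l, (v first).take n <+: v t)
          (m := 0) (Nat.zero_le _) (fun t _ => by simp)
      apply agree_le_lcp _ _ _ (Nat.findGreatest_le _)
      intro i hi
      have hlen : ((v first).take
          (Nat.findGreatest (fun n => ∀ t ∈ l, (v first).take n <+: v t) (v first).length)).length
          = Nat.findGreatest (fun n => ∀ t ∈ l, (v first).take n <+: v t) (v first).length := by
        rw [List.length_take]
        exact Nat.min_eq_left (Nat.findGreatest_le _)
      have h1 := prefix_agree (hP t ht) i (by rw [hlen]; exact hi)
      rw [List.getElem?_take, if_pos hi] at h1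
      rw [h1]
  · apply Nat.le_findGreatest (foldl_min_le_init _ _ _)
    intro t ht
    exact take_prefix_of_le_lcp _ _ _ (foldl_min_le_mem _ _ _ t ht) (foldl_min_le_init _ _ _)

lemma pvQ_fold (first : String) (rest : List String) :
    pvQ (first :: rest) = (first :: rest).foldl
      (fun m t => min m (pvLcpLen first.toList t.toList)) first.toList.length := by
  show Nat.findGreatest _ _ = _
  exact fg_eq String.toList first (first :: rest)

lemma pvR_fold (first : String) (rest : List String) :
    pvR (first :: rest) = (first :: rest).foldl
      (fun m t => min m (pvLcpLen first.toList.reverse t.toList.reverse)) first.toList.length := by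
  unfold pvR
  have h := fg_eq (fun (t : String) => t.toList.reverse) first (first :: rest)
  simp only [List.length_reverse] at h ⊢
  exact h

lemma pvCore (first : List Char) (L : List (List Char)) (hfm : first ∈ L)
    (hnp : ¬ ∃ f ∈ L, ∀ g ∈ L, f <+: g) (q : Nat)
    (hq : q = L.foldl (fun m t => min m (pvLcpLen first t)) first.length) :
    (∀ t ∈ L, q < t.length) ∧ (∀ t ∈ L, ∀ i < q, t[i]? = first[i]?) ∧
    (∀ f ∈ L, ∃ g ∈ L, g[q]? ≠ f[q]?) := by
  have hq_le : ∀ t ∈ L, q ≤ pvLcpLen first t := by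
    intro t ht; rw [hq]; exact foldl_min_le_mem _ L _ t ht
  have hagree : ∀ t ∈ L, ∀ i < q, t[i]? = first[i]? := by
    intro t ht i hi
    exact (lcp_get first t i (lt_of_lt_of_le hi (hq_le t ht))).symm
  have hlen : ∀ t ∈ L, q < t.length := by
    by_contra hc
    push Not at hc
    obtain ⟨t0, ht0, hlt⟩ := hc
    apply hnp
    refine ⟨t0, ht0, fun g hg => ?_⟩
    apply prefix_of_agree
    intro i hi
    have h1 : g[i]? = first[i]? := hagree g hg i (by omega)
    have h2 : first[i]? = t0[i]? := lcp_get first t0 i (by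
      have := hq_le t0 ht0; omega)
    rw [h1, h2]
  have hattain : ∃ t ∈ L, q = pvLcpLen first t := by
    rcases foldl_min_attain (fun t => pvLcpLen first t) L first.length with h | h
    · exact ⟨first, hfm, by rw [hq, h, lcp_self]⟩
    · obtain ⟨t, ht, he⟩ := h; exact ⟨t, ht, by rw [hq]; exact he⟩
  refine ⟨hlen, hagree, ?_⟩
  obtain ⟨t1, ht1, hqt1⟩ := hattain
  have hne : first[q]? ≠ t1[q]? := by
    have := lcp_ne first t1 (by rw [← hqt1] at *; exact hlen first hfm) (by rw [← hqt1] at *; exact hlen t1 ht1)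
    rwa [← hqt1] at this
  intro f hf
  by_cases hc : f[q]? = first[q]?
  · exact ⟨t1, ht1, by rw [hc]; exact fun h => hne h.symm⟩
  · exact ⟨first, hfm, fun h => hc h.symm⟩

lemma find?_range_eq_some {p : Nat → Bool} : ∀ {len n : Nat}, n < len → p n = true →
    (∀ i < n, p i = false) → (List.range len).find? p = some n := by
  intro len
  induction len with
  | zero => intro n h; omega
  | succ m ih =>
    intro n hlt hp hlo
    rw [List.range_succ, List.find?_append]
    by_cases hnm : n < m
    · rw [ih hnm hp hlo]; rfl
    · have hn : n = m := by omega
      have : (List.range m).find? p = none := by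
        rw [List.find?_eq_none]
        intro x hx
        simp only [List.mem_range] at hx
        simp [hlo x (by omega)]
      subst hn
      rw [this]
      simp [hp]

lemma pyGet?_neg_succ (s : List Char) (j : Nat) :
    PySem.List.pyGet? s (-(j : Int) - 1) = s.reverse[j]? := by
  by_cases hj : j < s.length
  · have hcast : (-(j : Int) - 1) = -(((j + 1 : Nat)) : Int) := by push_cast; ring
    rw [hcast, PySem.List.pyGet?_neg_natCast s (j + 1) (by omega) (by omega),
      List.getElem?_reverse hj]
    congr 1
    omega
  · rw [(PySem.List.pyGet?_eq_none_iff s _).mpr, List.getElem?_eq_none (by simpa using by omega)]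
    simp only [PySem.Raise.InRange]
    omega

lemma id_eq_seg (l : List String)
    (hnp : ¬ ∃ f ∈ l, ∀ g ∈ l, f.toList <+: g.toList)
    (hns : ¬ ∃ f ∈ l, ∀ g ∈ l, f.toList <:+ g.toList)
    (f : String) (hf : f ∈ l) :
    pvIdFromFilename f l = pvSeg l f := by
  cases l with
  | nil => simp at hf
  | cons first rest =>
    set l := first :: rest with hl
    set L := l.map String.toList with hL
    set L' := l.map (fun t => t.toList.reverse) with hL'
    have hQ : pvQ l = L.foldl (fun m t => min m (pvLcpLen first.toList t)) first.toList.length := by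
      rw [hl, pvQ_fold]
      simp [hL, List.foldl_map, hl]
    have hR : pvR l = L'.foldl (fun m t => min m (pvLcpLen first.toList.reverse t)) first.toList.reverse.length := by
      rw [hl, pvR_fold]
      simp [hL', List.foldl_map, hl]
    obtain ⟨hq1, hq2, hq3⟩ := pvCore first.toList L (List.mem_map_of_mem (by simp [hl]))
      (by
        rintro ⟨f', hf', hall⟩
        obtain ⟨f0, hf0, rfl⟩ := List.mem_map.mp hf'
        exact hnp ⟨f0, hf0, fun g hg => hall g.toList (List.mem_map_of_mem hg)⟩)
      (pvQ l) hQ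
    obtain ⟨hr1, hr2, hr3⟩ := pvCore first.toList.reverse L' (List.mem_map_of_mem (f := fun (t : String) => t.toList.reverse) (by simp [hl]))
      (by
        rintro ⟨f', hf', hall⟩
        obtain ⟨f0, hf0, rfl⟩ := List.mem_map.mp hf'
        refine hns ⟨f0, hf0, fun g hg => ?_⟩
        exact List.reverse_prefix.mp (hall g.toList.reverse (List.mem_map_of_mem hg)))
      (pvR l) hR
    have hfL : f.toList ∈ L := List.mem_map_of_mem hf
    have hfL' : f.toList.reverse ∈ L' := List.mem_map_of_mem hf
    have hqn : pvQ l < f.toList.length := hq1 _ hfL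
    have hrn : pvR l < f.toList.length := by simpa using hr1 _ hfL'
    have hstart : ((List.range f.toList.length).find? (fun (i : Nat) =>
        l.any (fun file => decide (PySem.Str.pyGet? file ((i : Int)) ≠ PySem.Str.pyGet? f ((i : Int)))))) = some (pvQ l) := by
      apply find?_range_eq_some hqn
      · rw [List.any_eq_true]
        obtain ⟨g', hg', hne⟩ := hq3 f.toList hfL
        obtain ⟨g, hg, rfl⟩ := List.mem_map.mp hg'
        exact ⟨g, hg, by simp [pysem]; exact hne⟩
      · intro i hi
        rw [List.any_eq_false]
        intro file hfile
        have h1 : file.toList[i]? = first.toList[i]? := hq2 _ (List.mem_map_of_mem hfile) i hi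
        have h2 : f.toList[i]? = first.toList[i]? := hq2 _ hfL i hi
        simp [pysem, h1, h2]
    have hb : ∀ (s : String) (j : Nat), PySem.Str.pyGet? s (-(j : Int) - 1) = s.toList.reverse[j]? := by
      intro s j
      have hbr : PySem.Str.pyGet? s (-(j : Int) - 1) = PySem.List.pyGet? s.toList (-(j : Int) - 1) := by
        simp [pysem]
      rw [hbr, pyGet?_neg_succ]
    have hend : ((List.range f.toList.length).find? (fun (j : Nat) =>
        l.any (fun file => decide (PySem.Str.pyGet? file (-((j : Int)) - 1) ≠ PySem.Str.pyGet? f (-((j : Int)) - 1))))) = some (pvR l) := by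
      apply find?_range_eq_some hrn
      · rw [List.any_eq_true]
        obtain ⟨g', hg', hne⟩ := hr3 f.toList.reverse hfL'
        obtain ⟨g, hg, rfl⟩ := List.mem_map.mp hg'
        exact ⟨g, hg, by simp only [hb, ne_eq, decide_eq_true_eq]; exact hne⟩
      · intro j hj
        rw [List.any_eq_false]
        intro file hfile
        have h1 : file.toList.reverse[j]? = first.toList.reverse[j]? :=
          hr2 _ (List.mem_map_of_mem (f := fun (t : String) => t.toList.reverse) hfile) j hj
        have h2 : f.toList.reverse[j]? = first.toList.reverse[j]? := hr2 _ hfL' j hj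
        simp only [hb, ne_eq, h1, h2]; simp
    have hslice : ∀ (xs : List Char) (a b : Int), PySem.List.slice xs (some a) (some b) =
        (xs.drop (PySem.List.clampIdx xs.length a)).take (PySem.List.clampIdx xs.length b - PySem.List.clampIdx xs.length a) :=
      fun _ _ _ => rfl
    show pvIdFromFilename f l = pvSeg l f
    unfold pvIdFromFilename
    simp only [hstart, hend, Option.getD_some]
    by_cases hr0 : pvR l = 0
    · rw [if_pos hr0]
      apply String.toList_inj.mp
      rw [PySem.Str.toList_slice, pvSeg, hr0, PySem.Str.toList_slice]
      simp only [PySem.Chars.slice_eq_listSlice]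
      rw [PySem.List.slice_from_natCast]
      have : ((f.toList.length : Int) - (0 : Nat)) = ((f.toList.length : Nat) : Int) := by push_cast; ring
      rw [this, PySem.List.slice_natCast]
      exact (List.take_of_length_le (by simp)).symm
    · rw [if_neg hr0]
      apply String.toList_inj.mp
      rw [PySem.Str.toList_slice, pvSeg, PySem.Str.toList_slice]
      simp only [PySem.Chars.slice_eq_listSlice]
      rw [hslice, hslice]
      have hc1 : PySem.List.clampIdx f.toList.length (-(pvR l : Int)) = f.toList.length - pvR l :=
        PySem.List.clampIdx_neg_natCast _ _ (by omega)
      have hc2 : ((f.toList.length : Int) - (pvR l : Int)) = (((f.toList.length - pvR l : Nat)) : Int) := by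
        push_cast [Nat.cast_sub (le_of_lt hrn)]; ring
      rw [hc1, hc2]
      simp only [PySem.List.clampIdx_natCast]
      congr 1
      omega

lemma out_single (k : Int × String) (t : String) :
    (PySem.List.sorted2 ((PySem.Dict.empty : PySem.Dict (Int × String) String).insert k t).keys Prod.fst Prod.snd).map
      (fun key => ((PySem.Dict.empty : PySem.Dict (Int × String) String).insert k t).getD key "") = [t] := by
  have hkeys : ((PySem.Dict.empty : PySem.Dict (Int × String) String).insert k t).keys = [k] := by
    rw [PySem.Dict.keys_insert_of_not_contains _ _ (PySem.Dict.contains_empty k), PySem.Dict.keys_empty]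
    rfl
  rw [hkeys, List.perm_singleton.mp (PySem.List.sorted2_perm [k] Prod.fst Prod.snd false)]
  simp [PySem.Dict.getD_insert_self]

lemma fold_const (K : String → Int × String) (t : String) :
    ∀ (rest : List String), (∀ x ∈ rest, x = t) → ∀ (d : PySem.Dict (Int × String) String),
      rest.foldl (fun d x => d.insert (K x) x) (d.insert (K t) t) = d.insert (K t) t := by
  intro rest
  induction rest with
  | nil => intro _ d; rfl
  | cons x xs ih =>
    intro h d
    simp only [List.foldl_cons]
    rw [h x (by simp), PySem.Dict.insert_insert_self]
    exact ih (fun y hy => h y (by simp [hy])) d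

lemma allequal_A (t : String) (rest : List String) (h : ∀ x ∈ rest, x = t) :
    sort_natural (t :: rest) = [t] := by
  unfold sort_natural
  simp only [List.foldl_cons]
  rw [fold_const _ t rest h PySem.Dict.empty]
  exact out_single _ t

lemma allequal_B (t : String) (rest : List String) (h : ∀ x ∈ rest, x = t) :
    sort_natural_alt (t :: rest) = [t] := by
  unfold sort_natural_alt
  simp only [List.foldl_cons]
  rw [fold_const _ t rest h PySem.Dict.empty]
  exact out_single _ t

lemma pv_main_eq : ∀ (text_list : List String), Dom_sort_natural text_list →
    Pre_sort_natural text_list → sort_natural text_list = sort_natural_alt text_list := by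
  intro l hdom hpre
  obtain ⟨_h1, h2⟩ := hpre
  match l with
  | [] => rfl
  | first :: rest =>
    rcases h2 with hall | ⟨hnp, hns, _⟩
    · have h' : ∀ x ∈ rest, x = first := fun x hx => hall x (by simp [hx]) first (by simp)
      rw [allequal_A first rest h', allequal_B first rest h']
    · have hid : ∀ f ∈ (first :: rest), pvIdFromFilename f (first :: rest) = pvSeg (first :: rest) f :=
        fun f hf => id_eq_seg _ hnp hns f hf
      have hA : sort_natural (first :: rest) =
          (PySem.List.sorted2 ((first :: rest).foldl (fun d t =>
              d.insert (pvAtoi (pvSeg (first :: rest) t)) t)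
            (PySem.Dict.empty : PySem.Dict (Int × String) String)).keys Prod.fst Prod.snd).map
            (fun key => (((first :: rest).foldl (fun d t =>
              d.insert (pvAtoi (pvSeg (first :: rest) t)) t)
            (PySem.Dict.empty : PySem.Dict (Int × String) String)).getD key "")) := by
        unfold sort_natural
        rw [PySem.List.foldl_congr_mem _ _
          (fun d t => d.insert (pvAtoi (pvSeg (first :: rest) t)) t) _
          (fun acc x hx => by rw [hid x hx])]
      have hpq : (first :: rest).foldl (fun m t => min m (pvLcpLen first.toList t.toList))
          first.toList.length = pvQ (first :: rest) := (pvQ_fold first rest).symm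
      have hpr : (first :: rest).foldl (fun m t => min m (pvLcpLen first.toList.reverse t.toList.reverse))
          first.toList.length = pvR (first :: rest) := (pvR_fold first rest).symm
      rw [hA]
      unfold sort_natural_alt pvSeg
      simp only [PySem.Str.slice?_none_none_neg_one, Option.getD_some, String.toList_ofList]
      rw [PySem.List.foldl_prod_mk (fun m (t : String) => min m (pvLcpLen first.toList t.toList))
          (fun m (t : String) => min m (pvLcpLen first.toList.reverse t.toList.reverse))]
      rw [hpq, hpr]

-- ===== VERDICT =====
theorem sort_natural_spec : Claim_equal_sort_natural := by
  intro text_list hdom hpre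
  unfold Spec_sort_natural
  exact pv_main_eq text_list hdom hpre
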